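-- pv_equiv track=rewrite | github.com/narbada75/Assignment_2 | decrypt.py | create_decrypt_map
-- ===== SOURCE A (Python) =====
-- import string
--
-- def create_decrypt_map(shift1, shift2):
--     """Creates a reverse mapping to safely handle character wrapping."""
--     rev_map = {}
--     for c in string.ascii_lowercase:
--         if 'a' <= c <= 'm':
--             enc = chr((ord(c) - 97 + (shift1 * shift2)) % 26 + 97)
--         else:
--             enc = chr((ord(c) - 97 - (shift1 + shift2)) % 26 + 97)
--         rev_map[enc] = c
--
--     for c in string.ascii_uppercase:
--         if 'A' <= c <= 'M':
--             enc = chr((ord(c) - 65 - shift1) % 26 + 65)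
--         else:
--             enc = chr((ord(c) - 65 + (shift2 ** 2)) % 26 + 65)
--         rev_map[enc] = c
--     return rev_map
-- ===== SOURCE B (Python) =====
-- import string
--
-- def create_decrypt_map(shift1, shift2):
--     """Creates a reverse mapping to safely handle character wrapping."""
--     low = string.ascii_lowercase
--     up = string.ascii_uppercase
--
--     def rot(abc, k):
--         k %= 26
--         return abc[k:] + abc[:k]
--
--     # For each of the four half-alphabet blocks the encryption is a fixed
--     # rotation, so the (encrypted, plain) pairs are a zip of two slices.
--     pairs = list(zip(rot(low, shift1 * shift2)[:13], low[:13]))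
--     pairs += list(zip(rot(low, -(shift1 + shift2))[13:], low[13:]))
--     pairs += list(zip(rot(up, -shift1)[:13], up[:13]))
--     pairs += list(zip(rot(up, shift2 ** 2)[13:], up[13:]))
--     return dict(pairs)
-- ===== Notes on version B (the rewrite author's own statement) =====
-- stated objective: alternative
-- what changed: A loops over each character applying one of four affine rules and assigning rev_map[enc] = c; B observes each half-alphabet block is one fixed rotation, builds the (encrypted, plain) pair list by zipping alphabet slices of rot(alphabet, k), and inverts it with a single dict() call (same insertion order and last-write-wins).
import Mathlib
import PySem

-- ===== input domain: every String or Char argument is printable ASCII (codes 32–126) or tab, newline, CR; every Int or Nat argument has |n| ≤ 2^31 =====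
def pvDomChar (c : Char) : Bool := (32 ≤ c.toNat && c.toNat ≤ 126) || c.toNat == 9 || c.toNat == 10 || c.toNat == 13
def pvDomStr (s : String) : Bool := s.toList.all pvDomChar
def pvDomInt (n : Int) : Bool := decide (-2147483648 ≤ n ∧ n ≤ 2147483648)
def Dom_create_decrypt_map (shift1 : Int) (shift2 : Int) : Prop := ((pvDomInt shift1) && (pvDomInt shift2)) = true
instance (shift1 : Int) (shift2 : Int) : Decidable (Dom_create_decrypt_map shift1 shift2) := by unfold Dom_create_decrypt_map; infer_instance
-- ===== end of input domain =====

-- B replaces A's per-character branching loop by four slice-rotation zips whose pair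
-- list is inverted into the dict in one pass (alternative decomposition, same cost).

-- ===== PORT A =====
-- string.ascii_lowercase / string.ascii_uppercase as explicit character lists
def pvAsciiLowercase : List Char := ['a','b','c','d','e','f','g','h','i','j','k','l','m','n','o','p','q','r','s','t','u','v','w','x','y','z']
def pvAsciiUppercase : List Char := ['A','B','C','D','E','F','G','H','I','J','K','L','M','N','O','P','Q','R','S','T','U','V','W','X','Y','Z']

-- A: one dict, two loops over the alphabets, per-character affine encryption, rev_map[enc] = c.
def create_decrypt_map (shift1 : Int) (shift2 : Int) : List (String × String) :=
  (pvAsciiUppercase.foldl (fun d c =>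
      d.insert
        (String.ofList [if 'A' ≤ c ∧ c ≤ 'M'
          then Char.ofNat ((PySem.Int.mod ((c.toNat : Int) - 65 - shift1) 26 + 65).toNat)
          else Char.ofNat ((PySem.Int.mod ((c.toNat : Int) - 65 + shift2 ^ 2) 26 + 65).toNat)])
        (String.ofList [c]))
    (pvAsciiLowercase.foldl (fun d c =>
      d.insert
        (String.ofList [if 'a' ≤ c ∧ c ≤ 'm'
          then Char.ofNat ((PySem.Int.mod ((c.toNat : Int) - 97 + shift1 * shift2) 26 + 97).toNat)
          else Char.ofNat ((PySem.Int.mod ((c.toNat : Int) - 97 - (shift1 + shift2)) 26 + 97).toNat)])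
        (String.ofList [c]))
      (PySem.Dict.empty : PySem.Dict String String))).items

-- ===== PORT B =====
-- B-side helper: rot(abc, k) = abc[k % 26:] + abc[:k % 26]
def pvRot (abc : List Char) (x : Int) : List Char :=
  PySem.List.slice abc (some (PySem.Int.mod x 26)) none
    ++ PySem.List.slice abc none (some (PySem.Int.mod x 26))

def create_decrypt_map_alt (shift1 : Int) (shift2 : Int) : List (String × String) :=
  (((PySem.List.slice (pvRot pvAsciiLowercase (shift1 * shift2)) none (some 13)).zip
      (PySem.List.slice pvAsciiLowercase none (some 13))
    ++ (PySem.List.slice (pvRot pvAsciiLowercase (-(shift1 + shift2))) (some 13) none).zip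
      (PySem.List.slice pvAsciiLowercase (some 13) none)
    ++ (PySem.List.slice (pvRot pvAsciiUppercase (-shift1)) none (some 13)).zip
      (PySem.List.slice pvAsciiUppercase none (some 13))
    ++ (PySem.List.slice (pvRot pvAsciiUppercase (shift2 ^ 2)) (some 13) none).zip
      (PySem.List.slice pvAsciiUppercase (some 13) none)).foldl
    (fun d p => d.insert (String.ofList [p.1]) (String.ofList [p.2]))
    (PySem.Dict.empty : PySem.Dict String String)).items

-- ===== PRECONDITION & SPEC =====
def Spec_create_decrypt_map (shift1 : Int) (shift2 : Int) (out : List (String × String)) : Prop := out = create_decrypt_map_alt shift1 shift2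
instance (shift1 : Int) (shift2 : Int) (out : List (String × String)) : Decidable (Spec_create_decrypt_map shift1 shift2 out) := by unfold Spec_create_decrypt_map; infer_instance

-- ===== CLAIM (what is proved, stated in full; the proofs are below) =====
def Claim_equal_create_decrypt_map : Prop := ∀ (shift1 : Int) (shift2 : Int), Dom_create_decrypt_map shift1 shift2 → Spec_create_decrypt_map shift1 shift2 (create_decrypt_map shift1 shift2)

-- ===== LEMMAS AND PROOFS =====

-- a loop inserting (K c, V c) into the dict is a fold of insert over the mapped pair list
theorem pv_foldl_insert_eq_map {α : Type} (K V : α → String) (xs : List α) (d : PySem.Dict String String) :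
    xs.foldl (fun d c => d.insert (K c) (V c)) d
      = (xs.map (fun c => (K c, V c))).foldl (fun d p => d.insert p.1 p.2) d := by
  induction xs generalizing d with
  | nil => rfl
  | cons h t ih => simp [List.foldl, List.map, ih]

-- the four half-alphabet blocks: A's affine formula lists B's rotation-slice zips, element by element
theorem pv_low1 (x : Int) :
    (['a','b','c','d','e','f','g','h','i','j','k','l','m']).map (fun c =>
        (Char.ofNat ((((c.toNat : Int) - 97 + x) % 26 + 97).toNat), c))
      = (PySem.List.slice (pvRot pvAsciiLowercase x) none (some 13)).zip
          (PySem.List.slice pvAsciiLowercase none (some 13)) := by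
  have hm : ∀ a : Int, PySem.Int.mod a 26 = a % 26 := fun a => PySem.Int.mod_eq_emod_of_pos (by norm_num)
  have hsh : ∀ a : Int, (a + x) % 26 = (a + x % 26) % 26 := by intro a; omega
  have h0 : 0 ≤ x % 26 := Int.emod_nonneg x (by norm_num)
  have h1 : x % 26 < 26 := Int.emod_lt_of_pos x (by norm_num)
  have key : ∀ n : Fin 26,
      (['a','b','c','d','e','f','g','h','i','j','k','l','m']).map (fun c =>
        (Char.ofNat ((((c.toNat : Int) - 97 + (n.val : Int)) % 26 + 97).toNat), c))
      = (PySem.List.slice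
            (PySem.List.slice pvAsciiLowercase (some ((n.val : Int))) none
              ++ PySem.List.slice pvAsciiLowercase none (some ((n.val : Int))))
            none (some 13)).zip
          (PySem.List.slice pvAsciiLowercase none (some 13)) := by decide
  unfold pvRot
  simp only [hm, hsh]
  generalize x % 26 = e at h0 h1 ⊢
  have he : e = ((e.toNat : Int)) := by omega
  rw [he]
  exact key ⟨e.toNat, by omega⟩

theorem pv_low2 (y : Int) :
    (['n','o','p','q','r','s','t','u','v','w','x','y','z']).map (fun c =>
        (Char.ofNat ((((c.toNat : Int) - 97 - y) % 26 + 97).toNat), c))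
      = (PySem.List.slice (pvRot pvAsciiLowercase (-y)) (some 13) none).zip
          (PySem.List.slice pvAsciiLowercase (some 13) none) := by
  have hm : ∀ a : Int, PySem.Int.mod a 26 = a % 26 := fun a => PySem.Int.mod_eq_emod_of_pos (by norm_num)
  have hsh : ∀ a : Int, (a - y) % 26 = (a + (-y) % 26) % 26 := by intro a; omega
  have h0 : 0 ≤ (-y) % 26 := Int.emod_nonneg (-y) (by norm_num)
  have h1 : (-y) % 26 < 26 := Int.emod_lt_of_pos (-y) (by norm_num)
  have key : ∀ n : Fin 26,
      (['n','o','p','q','r','s','t','u','v','w','x','y','z']).map (fun c =>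
        (Char.ofNat ((((c.toNat : Int) - 97 + (n.val : Int)) % 26 + 97).toNat), c))
      = (PySem.List.slice
            (PySem.List.slice pvAsciiLowercase (some ((n.val : Int))) none
              ++ PySem.List.slice pvAsciiLowercase none (some ((n.val : Int))))
            (some 13) none).zip
          (PySem.List.slice pvAsciiLowercase (some 13) none) := by decide
  unfold pvRot
  simp only [hm, hsh]
  generalize (-y) % 26 = e at h0 h1 ⊢
  have he : e = ((e.toNat : Int)) := by omega
  rw [he]
  exact key ⟨e.toNat, by omega⟩

theorem pv_up1 (x : Int) :
    (['A','B','C','D','E','F','G','H','I','J','K','L','M']).map (fun c =>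
        (Char.ofNat ((((c.toNat : Int) - 65 - x) % 26 + 65).toNat), c))
      = (PySem.List.slice (pvRot pvAsciiUppercase (-x)) none (some 13)).zip
          (PySem.List.slice pvAsciiUppercase none (some 13)) := by
  have hm : ∀ a : Int, PySem.Int.mod a 26 = a % 26 := fun a => PySem.Int.mod_eq_emod_of_pos (by norm_num)
  have hsh : ∀ a : Int, (a - x) % 26 = (a + (-x) % 26) % 26 := by intro a; omega
  have h0 : 0 ≤ (-x) % 26 := Int.emod_nonneg (-x) (by norm_num)
  have h1 : (-x) % 26 < 26 := Int.emod_lt_of_pos (-x) (by norm_num)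
  have key : ∀ n : Fin 26,
      (['A','B','C','D','E','F','G','H','I','J','K','L','M']).map (fun c =>
        (Char.ofNat ((((c.toNat : Int) - 65 + (n.val : Int)) % 26 + 65).toNat), c))
      = (PySem.List.slice
            (PySem.List.slice pvAsciiUppercase (some ((n.val : Int))) none
              ++ PySem.List.slice pvAsciiUppercase none (some ((n.val : Int))))
            none (some 13)).zip
          (PySem.List.slice pvAsciiUppercase none (some 13)) := by decide
  unfold pvRot
  simp only [hm, hsh]
  generalize (-x) % 26 = e at h0 h1 ⊢
  have he : e = ((e.toNat : Int)) := by omega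
  rw [he]
  exact key ⟨e.toNat, by omega⟩

theorem pv_up2 (x : Int) :
    (['N','O','P','Q','R','S','T','U','V','W','X','Y','Z']).map (fun c =>
        (Char.ofNat ((((c.toNat : Int) - 65 + x) % 26 + 65).toNat), c))
      = (PySem.List.slice (pvRot pvAsciiUppercase x) (some 13) none).zip
          (PySem.List.slice pvAsciiUppercase (some 13) none) := by
  have hm : ∀ a : Int, PySem.Int.mod a 26 = a % 26 := fun a => PySem.Int.mod_eq_emod_of_pos (by norm_num)
  have hsh : ∀ a : Int, (a + x) % 26 = (a + x % 26) % 26 := by intro a; omega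
  have h0 : 0 ≤ x % 26 := Int.emod_nonneg x (by norm_num)
  have h1 : x % 26 < 26 := Int.emod_lt_of_pos x (by norm_num)
  have key : ∀ n : Fin 26,
      (['N','O','P','Q','R','S','T','U','V','W','X','Y','Z']).map (fun c =>
        (Char.ofNat ((((c.toNat : Int) - 65 + (n.val : Int)) % 26 + 65).toNat), c))
      = (PySem.List.slice
            (PySem.List.slice pvAsciiUppercase (some ((n.val : Int))) none
              ++ PySem.List.slice pvAsciiUppercase none (some ((n.val : Int))))
            (some 13) none).zip
          (PySem.List.slice pvAsciiUppercase (some 13) none) := by decide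
  unfold pvRot
  simp only [hm, hsh]
  generalize x % 26 = e at h0 h1 ⊢
  have he : e = ((e.toNat : Int)) := by omega
  rw [he]
  exact key ⟨e.toNat, by omega⟩

set_option maxRecDepth 8192 in
theorem pv_main (shift1 shift2 : Int) :
    create_decrypt_map shift1 shift2 = create_decrypt_map_alt shift1 shift2 := by
  unfold create_decrypt_map create_decrypt_map_alt
  rw [pv_foldl_insert_eq_map
        (K := fun c => String.ofList [if 'a' ≤ c ∧ c ≤ 'm'
          then Char.ofNat ((PySem.Int.mod ((c.toNat : Int) - 97 + shift1 * shift2) 26 + 97).toNat)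
          else Char.ofNat ((PySem.Int.mod ((c.toNat : Int) - 97 - (shift1 + shift2)) 26 + 97).toNat)])
        (V := fun c => String.ofList [c]),
      pv_foldl_insert_eq_map
        (K := fun c => String.ofList [if 'A' ≤ c ∧ c ≤ 'M'
          then Char.ofNat ((PySem.Int.mod ((c.toNat : Int) - 65 - shift1) 26 + 65).toNat)
          else Char.ofNat ((PySem.Int.mod ((c.toNat : Int) - 65 + shift2 ^ 2) 26 + 65).toNat)])
        (V := fun c => String.ofList [c]),
      pv_foldl_insert_eq_map
        (K := fun p : Char × Char => String.ofList [p.1])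
        (V := fun p : Char × Char => String.ofList [p.2]),
      ← List.foldl_append]
  refine congrArg PySem.Dict.items (congrArg (List.foldl _ _) ?_)
  have hm : ∀ a : Int, PySem.Int.mod a 26 = a % 26 := fun a => PySem.Int.mod_eq_emod_of_pos (by norm_num)
  have hsplitL : pvAsciiLowercase = (['a','b','c','d','e','f','g','h','i','j','k','l','m']) ++ (['n','o','p','q','r','s','t','u','v','w','x','y','z']) := by decide
  have hsplitU : pvAsciiUppercase = (['A','B','C','D','E','F','G','H','I','J','K','L','M']) ++ (['N','O','P','Q','R','S','T','U','V','W','X','Y','Z']) := by decide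
  have hif1 : ∀ c ∈ (['a','b','c','d','e','f','g','h','i','j','k','l','m']), ('a' ≤ c ∧ c ≤ 'm') := by intro c hc; fin_cases hc <;> exact ⟨by decide, by decide⟩
  have hif2 : ∀ c ∈ (['n','o','p','q','r','s','t','u','v','w','x','y','z']), ¬('a' ≤ c ∧ c ≤ 'm') := by intro c hc; fin_cases hc <;> exact fun h => absurd h.2 (by decide)
  have hif3 : ∀ c ∈ (['A','B','C','D','E','F','G','H','I','J','K','L','M']), ('A' ≤ c ∧ c ≤ 'M') := by intro c hc; fin_cases hc <;> exact ⟨by decide, by decide⟩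
  have hif4 : ∀ c ∈ (['N','O','P','Q','R','S','T','U','V','W','X','Y','Z']), ¬('A' ≤ c ∧ c ≤ 'M') := by intro c hc; fin_cases hc <;> exact fun h => absurd h.2 (by decide)
  have e1 : List.map (fun c => (String.ofList [if 'a' ≤ c ∧ c ≤ 'm'
          then Char.ofNat ((PySem.Int.mod ((c.toNat : Int) - 97 + shift1 * shift2) 26 + 97).toNat)
          else Char.ofNat ((PySem.Int.mod ((c.toNat : Int) - 97 - (shift1 + shift2)) 26 + 97).toNat)],
          String.ofList [c])) (['a','b','c','d','e','f','g','h','i','j','k','l','m'])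
      = List.map (fun c => (String.ofList [Char.ofNat ((((c.toNat : Int) - 97 + shift1 * shift2) % 26 + 97).toNat)],
          String.ofList [c])) (['a','b','c','d','e','f','g','h','i','j','k','l','m']) :=
    List.map_congr_left (fun c hc => by simp only [hm, if_pos (hif1 c hc)])
  have e2 : List.map (fun c => (String.ofList [if 'a' ≤ c ∧ c ≤ 'm'
          then Char.ofNat ((PySem.Int.mod ((c.toNat : Int) - 97 + shift1 * shift2) 26 + 97).toNat)
          else Char.ofNat ((PySem.Int.mod ((c.toNat : Int) - 97 - (shift1 + shift2)) 26 + 97).toNat)],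
          String.ofList [c])) (['n','o','p','q','r','s','t','u','v','w','x','y','z'])
      = List.map (fun c => (String.ofList [Char.ofNat ((((c.toNat : Int) - 97 - (shift1 + shift2)) % 26 + 97).toNat)],
          String.ofList [c])) (['n','o','p','q','r','s','t','u','v','w','x','y','z']) :=
    List.map_congr_left (fun c hc => by simp only [hm, if_neg (hif2 c hc)])
  have e3 : List.map (fun c => (String.ofList [if 'A' ≤ c ∧ c ≤ 'M'
          then Char.ofNat ((PySem.Int.mod ((c.toNat : Int) - 65 - shift1) 26 + 65).toNat)
          else Char.ofNat ((PySem.Int.mod ((c.toNat : Int) - 65 + shift2 ^ 2) 26 + 65).toNat)],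
          String.ofList [c])) (['A','B','C','D','E','F','G','H','I','J','K','L','M'])
      = List.map (fun c => (String.ofList [Char.ofNat ((((c.toNat : Int) - 65 - shift1) % 26 + 65).toNat)],
          String.ofList [c])) (['A','B','C','D','E','F','G','H','I','J','K','L','M']) :=
    List.map_congr_left (fun c hc => by simp only [hm, if_pos (hif3 c hc)])
  have e4 : List.map (fun c => (String.ofList [if 'A' ≤ c ∧ c ≤ 'M'
          then Char.ofNat ((PySem.Int.mod ((c.toNat : Int) - 65 - shift1) 26 + 65).toNat)
          else Char.ofNat ((PySem.Int.mod ((c.toNat : Int) - 65 + shift2 ^ 2) 26 + 65).toNat)],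
          String.ofList [c])) (['N','O','P','Q','R','S','T','U','V','W','X','Y','Z'])
      = List.map (fun c => (String.ofList [Char.ofNat ((((c.toNat : Int) - 65 + shift2 ^ 2) % 26 + 65).toNat)],
          String.ofList [c])) (['N','O','P','Q','R','S','T','U','V','W','X','Y','Z']) :=
    List.map_congr_left (fun c hc => by simp only [hm, if_neg (hif4 c hc)])
  simp only [List.map_append]
  rw [← pv_low1 (shift1 * shift2), ← pv_low2 (shift1 + shift2), ← pv_up1 shift1, ← pv_up2 (shift2 ^ 2)]
  simp only [List.map_map]
  rw [hsplitL, hsplitU]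
  simp only [List.map_append, List.append_assoc]
  rw [e1, e2, e3, e4]
  rfl

-- ===== VERDICT (by name: the statement is the Claim_ definition above) =====
theorem create_decrypt_map_spec : Claim_equal_create_decrypt_map := by
  intro shift1 shift2 _
  unfold Spec_create_decrypt_map
  exact pv_main shift1 shift2
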